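-- pv_equiv track=rewrite | github.com/tamirat-wubie/mullu-control-plane | gateway/voice_worker.py | _risk_hint
-- ===== SOURCE A (Python) =====
-- def _risk_hint(transcript: str) -> str:
--     lowered = transcript.lower()
--     critical_terms = ("wire transfer", "delete production", "payment", "send money", "purchase")
--     high_terms = ("deploy", "submit", "send email", "send message", "refund", "delete")
--     if any(term in lowered for term in critical_terms):
--         return "critical"
--     if any(term in lowered for term in high_terms):
--         return "high"
--     return "low"
-- ===== SOURCE B (Python) =====
-- def _risk_hint(transcript: str) -> str:
--     lowered = transcript.lower()
--     table = (
--         ("wire transfer", 2), ("delete production", 2), ("payment", 2),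
--         ("send money", 2), ("purchase", 2),
--         ("deploy", 1), ("submit", 1), ("send email", 1),
--         ("send message", 1), ("refund", 1), ("delete", 1),
--     )
--     best = 0
--     for term, rank in table:
--         if term in lowered:
--             best = max(best, rank)
--     return ("low", "high", "critical")[best]
-- ===== Notes on version B (the rewrite author's own statement) =====
-- stated objective: idiomatic
-- what changed: Replaces the two short-circuiting any() guards over separate term tuples with a single ranked term->severity table folded once with max, mapping the best rank back to a label.
import Mathlib
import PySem

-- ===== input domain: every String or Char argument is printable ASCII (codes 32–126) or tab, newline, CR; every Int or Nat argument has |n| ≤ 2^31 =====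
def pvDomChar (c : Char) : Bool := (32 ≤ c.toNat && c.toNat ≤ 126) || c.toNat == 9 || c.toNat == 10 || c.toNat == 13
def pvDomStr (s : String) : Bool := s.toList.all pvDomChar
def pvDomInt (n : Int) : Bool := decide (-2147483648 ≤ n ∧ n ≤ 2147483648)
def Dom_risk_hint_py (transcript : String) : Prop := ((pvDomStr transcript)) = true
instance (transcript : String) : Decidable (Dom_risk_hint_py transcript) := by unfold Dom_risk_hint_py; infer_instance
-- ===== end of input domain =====

-- B replaces the two sequential any() guards with one ranked term→severity table folded with max; same cost, more idiomatic.

-- ===== PORT A =====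
def risk_hint_py (transcript : String) : String :=
  let lowered := PySem.Str.lower transcript
  let critical_terms := ["wire transfer", "delete production", "payment", "send money", "purchase"]
  let high_terms := ["deploy", "submit", "send email", "send message", "refund", "delete"]
  if critical_terms.any (fun term => PySem.Str.isIn term lowered) then "critical"
  else if high_terms.any (fun term => PySem.Str.isIn term lowered) then "high"
  else "low"

-- ===== PORT B =====
def risk_hint_py_alt (transcript : String) : String :=
  let lowered := PySem.Str.lower transcript
  let table : List (String × Nat) :=
    [("wire transfer", 2), ("delete production", 2), ("payment", 2),
     ("send money", 2), ("purchase", 2),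
     ("deploy", 1), ("submit", 1), ("send email", 1),
     ("send message", 1), ("refund", 1), ("delete", 1)]
  let best := table.foldl (fun best tr => if PySem.Str.isIn tr.1 lowered then max best tr.2 else best) 0
  ["low", "high", "critical"].getD best "low"

-- ===== PRECONDITION & SPEC =====
def Spec_risk_hint_py (transcript : String) (out : String) : Prop := out = risk_hint_py_alt transcript
instance (transcript : String) (out : String) : Decidable (Spec_risk_hint_py transcript out) := by unfold Spec_risk_hint_py; infer_instance

-- ===== CLAIM (what is proved, stated in full; the proofs are below) =====
def Claim_equal_risk_hint_py : Prop := ∀ (transcript : String), Dom_risk_hint_py transcript → Spec_risk_hint_py transcript (risk_hint_py transcript)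

-- ===== LEMMAS AND PROOFS =====

-- folding a constant-rank block of the table computes 'max a r' iff some term of the block matches
theorem foldl_rank_block (low : String) (ts : List String) (r a : Nat) :
    (ts.map (fun t => (t, r))).foldl
        (fun best tr => if PySem.Str.isIn tr.1 low then max best tr.2 else best) a
      = if ts.any (fun term => PySem.Str.isIn term low) then max a r else a := by
  induction ts generalizing a with
  | nil => simp
  | cons t ts ih =>
    simp only [List.map_cons, List.foldl_cons, List.any_cons]
    by_cases h : PySem.Str.isIn t low = true
    · rw [if_pos h, ih,
        if_pos (show (PySem.Str.isIn t low || ts.any fun term => PySem.Str.isIn term low) = true by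
          rw [h, Bool.true_or])]
      by_cases h2 : (ts.any fun term => PySem.Str.isIn term low) = true
      · rw [if_pos h2, Nat.max_assoc, Nat.max_self]
      · rw [if_neg h2]
    · rw [if_neg h, ih]
      by_cases h2 : (ts.any fun term => PySem.Str.isIn term low) = true
      · rw [if_pos h2, if_pos (show (PySem.Str.isIn t low || ts.any fun term => PySem.Str.isIn term low) = true by
          rw [h2, Bool.or_true])]
      · rw [if_neg h2, if_neg (fun hor => ((Bool.or_eq_true _ _).mp hor).elim h h2)]

-- the fold over B's literal table, characterised by the two any-tests of A
theorem fold_table_eq (low : String) :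
    ([("wire transfer", 2), ("delete production", 2), ("payment", 2),
      ("send money", 2), ("purchase", 2),
      ("deploy", 1), ("submit", 1), ("send email", 1),
      ("send message", 1), ("refund", 1), ("delete", 1)] : List (String × Nat)).foldl
        (fun best tr => if PySem.Str.isIn tr.1 low then max best tr.2 else best) 0
    = if ["wire transfer", "delete production", "payment", "send money", "purchase"].any
          (fun term => PySem.Str.isIn term low) then 2
      else if ["deploy", "submit", "send email", "send message", "refund", "delete"].any
          (fun term => PySem.Str.isIn term low) then 1
      else 0 := by
  rw [show ([("wire transfer", 2), ("delete production", 2), ("payment", 2),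
      ("send money", 2), ("purchase", 2),
      ("deploy", 1), ("submit", 1), ("send email", 1),
      ("send message", 1), ("refund", 1), ("delete", 1)] : List (String × Nat))
    = (["wire transfer", "delete production", "payment", "send money", "purchase"].map (fun t => (t, 2)))
      ++ (["deploy", "submit", "send email", "send message", "refund", "delete"].map (fun t => (t, 1))) from rfl,
    List.foldl_append, foldl_rank_block low, foldl_rank_block low]
  by_cases hc : (["wire transfer", "delete production", "payment", "send money", "purchase"].any
      (fun term => PySem.Str.isIn term low)) = true <;>
    by_cases hh : (["deploy", "submit", "send email", "send message", "refund", "delete"].any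
      (fun term => PySem.Str.isIn term low)) = true <;>
    simp only [hc, hh, if_pos, if_neg, Bool.not_eq_true] <;> rfl

-- ===== VERDICT (by name: the statement is the Claim_ definition above) =====
theorem risk_hint_py_spec : Claim_equal_risk_hint_py := by
  intro transcript _
  unfold Spec_risk_hint_py risk_hint_py risk_hint_py_alt
  simp only [fold_table_eq]
  split_ifs <;> rfl
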